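-- pv_equiv track=rewrite | github.com/Ace1928/eidosian_forge | archive_forge/code/func_word_shape.py | word_shape
-- ===== SOURCE A (Python) =====
-- def word_shape(text: str) -> str:
--     if len(text) >= 100:
--         return 'LONG'
--     shape = []
--     last = ''
--     shape_char = ''
--     seq = 0
--     for char in text:
--         if char.isalpha():
--             if char.isupper():
--                 shape_char = 'X'
--             else:
--                 shape_char = 'x'
--         elif char.isdigit():
--             shape_char = 'd'
--         else:
--             shape_char = char
--         if shape_char == last:
--             seq += 1
--         else:
--             seq = 0
--             last = shape_char
--         if seq < 4:
--             shape.append(shape_char)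
--     return ''.join(shape)
-- ===== SOURCE B (Python) =====
-- def word_shape(text: str) -> str:
--     if len(text) >= 100:
--         return 'LONG'
--     shape = ''.join(
--         ('X' if c.isupper() else 'x') if c.isalpha()
--         else ('d' if c.isdigit() else c)
--         for c in text)
--     # run-length group the shape string, then emit at most 4 copies per run
--     if not shape:
--         return ''
--     groups = []
--     cur, cnt = shape[0], 1
--     for c in shape[1:]:
--         if c == cur:
--             cnt += 1
--         else:
--             groups.append((cur, cnt))
--             cur, cnt = c, 1
--     groups.append((cur, cnt))
--     return ''.join(c * min(n, 4) for c, n in groups)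
-- ===== Notes on version B (the rewrite author's own statement) =====
-- stated objective: alternative
-- what changed: A's single stateful pass (running 'last' char and 'seq' counter with a conditional append) is replaced by a two-pass decomposition: first map every char to its shape class, then run-length group the shape string and emit min(run,4) copies per group.
import Mathlib
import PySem

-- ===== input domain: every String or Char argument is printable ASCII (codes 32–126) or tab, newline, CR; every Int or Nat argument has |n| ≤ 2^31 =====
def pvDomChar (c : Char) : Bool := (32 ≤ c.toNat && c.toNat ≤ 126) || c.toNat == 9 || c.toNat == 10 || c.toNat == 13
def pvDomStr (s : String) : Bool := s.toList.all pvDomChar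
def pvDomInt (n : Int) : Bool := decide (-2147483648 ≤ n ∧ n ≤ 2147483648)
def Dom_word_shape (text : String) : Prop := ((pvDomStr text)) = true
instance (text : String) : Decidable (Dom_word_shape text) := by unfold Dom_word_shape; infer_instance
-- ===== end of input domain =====

-- B replaces A's single stateful pass (running counter + conditional append) by a two-pass
-- decomposition: map each char to its shape class, then run-length group and emit min(run,4)
-- copies per group (objective: alternative decomposition, same cost).

-- shape class of one character (shared: both Pythons compute this classification verbatim)
def wsShapeChar (c : Char) : Char :=
  if PySem.Chars.isalpha c then
    (if PySem.Chars.isupper c then 'X' else 'x')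
  else if PySem.Chars.isdigit c then 'd'
  else c

-- ===== PORT A =====
-- loop body of A: state = (shape, last, seq); last = none models Python's initial last = ''
def wsStepA (st : List Char × Option Char × Int) (ch : Char) : List Char × Option Char × Int :=
  let sc := wsShapeChar ch
  let p := if some sc = st.2.1 then (st.2.2 + 1, st.2.1) else ((0 : Int), some sc)
  let shape := if p.1 < 4 then st.1 ++ [sc] else st.1
  (shape, p.2, p.1)

def word_shape (text : String) : String :=
  if 100 ≤ text.toList.length then "LONG"
  else
    let st := text.toList.foldl wsStepA ([], none, 0)
    String.ofList st.1

-- ===== PORT B =====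
-- loop body of B's grouping pass: state = (finished groups, current char, current run length)
def wsStepB (st : List (Char × Nat) × Char × Nat) (d : Char) : List (Char × Nat) × Char × Nat :=
  if d = st.2.1 then (st.1, st.2.1, st.2.2 + 1)
  else (st.1 ++ [(st.2.1, st.2.2)], d, 1)

def word_shape_alt (text : String) : String :=
  if 100 ≤ text.toList.length then "LONG"
  else
    let ms := text.toList.map wsShapeChar
    match ms with
    | [] => ""
    | c :: rest =>
      let st := rest.foldl wsStepB ([], c, 1)
      let groups := st.1 ++ [(st.2.1, st.2.2)]
      String.ofList (groups.flatMap (fun g => List.replicate (min g.2 4) g.1))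

-- ===== PRECONDITION & SPEC =====
def Spec_word_shape (text : String) (out : String) : Prop := out = word_shape_alt text
instance (text : String) (out : String) : Decidable (Spec_word_shape text out) := by unfold Spec_word_shape; infer_instance

-- ===== CLAIM (what is proved, stated in full; the proofs are below) =====
def Claim_equal_word_shape : Prop := ∀ (text : String), Dom_word_shape text → Spec_word_shape text (word_shape text)

-- ===== LEMMAS AND PROOFS =====

-- what A's loop emits from state (last = some lc, seq), over the shape-mapped tail
def wsEmit (lc : Char) (seq : Int) : List Char → List Char
  | [] => []
  | c :: rest =>
    if c = lc then (if seq + 1 < 4 then [c] else []) ++ wsEmit lc (seq + 1) rest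
    else c :: wsEmit c 0 rest

-- run-length encoding with an open current run (c, n)
def wsRleGo (c : Char) (n : Nat) : List Char → List (Char × Nat)
  | [] => [(c, n)]
  | d :: rest => if d = c then wsRleGo c (n + 1) rest else (c, n) :: wsRleGo d 1 rest

theorem foldA_emit (cs : List Char) (shape : List Char) (lc : Char) (seq : Int) :
    (cs.foldl wsStepA (shape, some lc, seq)).1
      = shape ++ wsEmit lc seq (cs.map wsShapeChar) := by
  induction cs generalizing shape lc seq with
  | nil => simp [wsEmit]
  | cons c rest ih =>
    simp only [List.foldl_cons, List.map_cons, wsStepA, wsEmit]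
    by_cases h : wsShapeChar c = lc
    · subst h
      by_cases h4 : seq + 1 < 4 <;> simp [h4, ih, List.append_assoc]
    · have : ¬ some (wsShapeChar c) = some lc := by simpa using h
      simp [this, h, ih, List.append_assoc]

theorem foldB_rle (ms : List Char) (out : List (Char × Nat)) (c : Char) (n : Nat) :
    (ms.foldl wsStepB (out, c, n)).1
        ++ [((ms.foldl wsStepB (out, c, n)).2.1, (ms.foldl wsStepB (out, c, n)).2.2)]
      = out ++ wsRleGo c n ms := by
  induction ms generalizing out c n with
  | nil => simp [wsRleGo]
  | cons d rest ih =>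
    simp only [List.foldl_cons, wsStepB, wsRleGo]
    by_cases h : d = c <;> simp [h, ih, List.append_assoc]

theorem rle_flatMap_emit (ms : List Char) (c : Char) (n : Nat) :
    (wsRleGo c n ms).flatMap (fun g => List.replicate (min g.2 4) g.1)
      = List.replicate (min n 4) c ++ wsEmit c ((n : Int) - 1) ms := by
  induction ms generalizing c n with
  | nil => simp [wsRleGo, wsEmit]
  | cons d rest ih =>
    simp only [wsRleGo, wsEmit]
    by_cases h : d = c
    · subst h
      have hseq : (n : Int) - 1 + 1 = (n : Int) := by ring
      rw [if_pos rfl, hseq, ih d (n + 1)]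
      by_cases h4 : n < 4
      · have h4' : ((n : Int)) < 4 := by exact_mod_cast h4
        have hmin : min (n + 1) 4 = min n 4 + 1 := by omega
        have hmin' : min n 4 = n := by omega
        simp [h4', hmin, hmin', List.replicate_succ']
      · have h4' : ¬ ((n : Int)) < 4 := by exact_mod_cast h4
        have hmin : min (n + 1) 4 = min n 4 := by omega
        simp [h4', hmin]
    · rw [if_neg h, if_neg h]
      simp [ih d 1, List.replicate_succ']

theorem word_shape_eq_alt (text : String) : word_shape text = word_shape_alt text := by
  unfold word_shape word_shape_alt
  by_cases hlong : 100 ≤ text.toList.length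
  · rw [if_pos hlong, if_pos hlong]
  · simp only [if_neg hlong]
    cases hcs : text.toList with
    | nil => rfl
    | cons c rest =>
      simp only [List.map_cons, List.foldl_cons]
      have step1 : wsStepA ([], none, 0) c = ([wsShapeChar c], some (wsShapeChar c), 0) := by
        simp [wsStepA]
      rw [step1, foldA_emit]
      have hB := foldB_rle (rest.map wsShapeChar) [] (wsShapeChar c) 1
      have : (((rest.map wsShapeChar).foldl wsStepB ([], wsShapeChar c, 1)).1
          ++ [(((rest.map wsShapeChar).foldl wsStepB ([], wsShapeChar c, 1)).2.1,
              ((rest.map wsShapeChar).foldl wsStepB ([], wsShapeChar c, 1)).2.2)]).flatMap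
            (fun g => List.replicate (min g.2 4) g.1)
          = [wsShapeChar c] ++ wsEmit (wsShapeChar c) 0 (rest.map wsShapeChar) := by
        rw [hB, List.nil_append, rle_flatMap_emit]
        norm_num
      have h2 := congrArg String.ofList this
      simp only [List.flatMap_append, List.flatMap_cons, List.flatMap_nil] at h2 ⊢
      simp only [List.append_nil] at h2 ⊢
      rw [← h2]

-- ===== VERDICT (by name: the statement is the Claim_ definition above) =====
theorem word_shape_spec : Claim_equal_word_shape := by
  intro text _
  unfold Spec_word_shape
  exact word_shape_eq_alt text
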